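-- pv_equiv track=rewrite | github.com/gopimahesh628/career_advisor | ai_models/career_matcher.py | match_careers
-- ===== SOURCE A (Python) =====
-- CAREER_DATABASE = {
--     "Data Scientist": ["python", "sql", "data science", "machine learning"],
--     "Full-Stack Developer": ["python", "django", "javascript", "html", "css"],
--     "Cloud Engineer": ["aws", "gcp", "azure", "python"],
--     "UI/UX Designer": ["ui/ux design", "figma", "photoshop", "html", "css"],
--     "Project Manager": ["project management", "agile", "scrum"],
-- }
--
-- def match_careers(skills):
--     """
--     Matches a user's skills to career paths and returns a ranked list.
--     The score is based on the number of matching skills.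
--     """
--     matches = {}
--
--     # Count how many required skills match the user's skills
--     for career, required_skills in CAREER_DATABASE.items():
--         score = 0
--         for skill in skills:
--             if skill.lower() in required_skills:
--                 score += 1
--
--         # Only suggest careers with at least one skill match
--         if score > 0:
--             matches[career] = score
--
--     # Sort careers by match score in descending order
--     sorted_matches = sorted(
--         matches.items(), key=lambda item: item[1], reverse=True
--     )
--
--     return sorted_matches
-- ===== SOURCE B (Python) =====
-- CAREER_DATABASE = {
--     "Data Scientist": ["python", "sql", "data science", "machine learning"],
--     "Full-Stack Developer": ["python", "django", "javascript", "html", "css"],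
--     "Cloud Engineer": ["aws", "gcp", "azure", "python"],
--     "UI/UX Designer": ["ui/ux design", "figma", "photoshop", "html", "css"],
--     "Project Manager": ["project management", "agile", "scrum"],
-- }
--
-- # Inverted index: skill -> list of careers requiring it, built once from the database.
-- SKILL_INDEX = {}
-- for _career, _reqs in CAREER_DATABASE.items():
--     for _r in _reqs:
--         SKILL_INDEX.setdefault(_r, []).append(_career)
--
-- def match_careers(skills):
--     # One pass over the user's skills: each skill credits every career that requires it.
--     scores = {}
--     for s in skills:
--         for career in SKILL_INDEX.get(s.lower(), []):
--             scores[career] = scores.get(career, 0) + 1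
--     matches = [(c, scores[c]) for c in CAREER_DATABASE if scores.get(c, 0) > 0]
--     matches.sort(key=lambda item: item[1], reverse=True)
--     return matches
-- ===== Notes on version B (the rewrite author's own statement) =====
-- stated objective: faster
-- what changed: B precomputes an inverted index (skill -> careers requiring it) from the fixed database once, then makes a single crediting pass over the user's skills (each skill bumps only the careers listed under it), emits positive-score careers in database order and sorts; A instead rescans the whole user skill list once per career with a list-membership test.
import Mathlib
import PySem

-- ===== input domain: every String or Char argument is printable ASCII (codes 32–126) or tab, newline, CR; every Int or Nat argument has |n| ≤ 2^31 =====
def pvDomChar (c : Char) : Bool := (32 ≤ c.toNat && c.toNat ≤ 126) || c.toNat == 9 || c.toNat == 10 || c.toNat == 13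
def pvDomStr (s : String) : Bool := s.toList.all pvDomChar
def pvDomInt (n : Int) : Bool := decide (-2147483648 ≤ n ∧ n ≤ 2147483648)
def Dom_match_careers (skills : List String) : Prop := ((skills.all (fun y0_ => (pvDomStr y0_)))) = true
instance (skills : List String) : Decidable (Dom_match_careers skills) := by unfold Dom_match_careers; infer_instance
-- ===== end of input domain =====

-- B builds an inverted index (skill -> careers requiring it) once and makes a single crediting
-- pass over the user's skills, instead of A's per-career rescan of the whole user skill list.

def careerDB : List (String × List String) :=
  [("Data Scientist", ["python", "sql", "data science", "machine learning"]),
   ("Full-Stack Developer", ["python", "django", "javascript", "html", "css"]),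
   ("Cloud Engineer", ["aws", "gcp", "azure", "python"]),
   ("UI/UX Designer", ["ui/ux design", "figma", "photoshop", "html", "css"]),
   ("Project Manager", ["project management", "agile", "scrum"])]

-- ===== PORT A =====
-- inner loop of A: scan the user's skills, count those whose lower() is in required
def matchScoreA (skills : List String) (required : List String) : Int :=
  skills.foldl (fun score skill => if PySem.Str.lower skill ∈ required then score + 1 else score) 0

def match_careers (skills : List String) : List (String × Int) :=
  let ms := careerDB.foldl
    (fun (m : List (String × Int)) p =>
      let score := matchScoreA skills p.2
      if score > 0 then m ++ [(p.1, score)] else m) []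
  PySem.List.sorted ms (fun item => item.2) true

-- ===== PORT B =====
-- module-level inverted index: SKILL_INDEX.setdefault(r, []).append(career)
-- (setdefault(r, []).append(c) = modify r with default [], appending c; exact)
def skillIndex : PySem.Dict String (List String) :=
  careerDB.foldl (fun d p =>
    p.2.foldl (fun d r => d.modify r [] (fun l => l ++ [p.1])) d) PySem.Dict.empty

-- single pass: each user skill credits every career listed under it in the index
def scoresB (skills : List String) : PySem.Dict String Int :=
  skills.foldl (fun sc s =>
    (skillIndex.getD (PySem.Str.lower s) []).foldl
      (fun sc c => sc.insert c (sc.getD c 0 + 1)) sc) PySem.Dict.empty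

def match_careers_alt (skills : List String) : List (String × Int) :=
  let scores := scoresB skills
  let ms := careerDB.filterMap (fun p =>
    if scores.getD p.1 0 > 0 then some (p.1, scores.getD p.1 0) else none)
  PySem.List.sorted ms (fun item => item.2) true

-- ===== PRECONDITION & SPEC =====
def Spec_match_careers (skills : List String) (out : List (String × Int)) : Prop := out = match_careers_alt skills
instance (skills : List String) (out : List (String × Int)) : Decidable (Spec_match_careers skills out) := by unfold Spec_match_careers; infer_instance

-- ===== CLAIM (what is proved, stated in full; the proofs are below) =====
def Claim_equal_match_careers : Prop := ∀ (skills : List String), Dom_match_careers skills → Spec_match_careers skills (match_careers skills)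

-- ===== LEMMAS AND PROOFS =====

-- the database, flattened into (required skill, career) pairs
def flatPairs : List (String × String) :=
  careerDB.flatMap (fun p => p.2.map (fun r => (r, p.1)))

lemma idx_getD (k : String) :
    skillIndex.getD k [] = (flatPairs.filter (fun q => q.1 == k)).map (fun q => q.2) := by
  have h : skillIndex = flatPairs.foldl (fun d q => d.modify q.1 [] (fun l => l ++ [q.2])) PySem.Dict.empty := by
    unfold skillIndex flatPairs
    rw [List.foldl_flatMap]
    simp only [List.foldl_map]
  rw [h, PySem.Dict.getD_foldl_modify_append]
  simp

-- the index lists career c exactly once under each skill of its required list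
lemma idx_count (c : String) (req : List String)
    (h : ∀ k, flatPairs.countP (fun q => (q.2 == c) && (q.1 == k)) = (if k ∈ req then 1 else 0)) :
    ∀ k, (((skillIndex.getD k []).count c : Nat) : Int) = if k ∈ req then 1 else 0 := by
  intro k
  rw [idx_getD, List.count_eq_countP, List.countP_map, List.countP_filter]
  have := h k
  simp only [Function.comp] at *
  rw [this]
  split <;> simp

lemma idx_DS : ∀ k, (((skillIndex.getD k []).count "Data Scientist" : Nat) : Int)
    = if k ∈ ["python", "sql", "data science", "machine learning"] then 1 else 0 := by
  apply idx_count
  intro k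
  simp [flatPairs, careerDB, List.countP_cons]
  by_cases h1 : k = "python" <;> by_cases h2 : k = "sql" <;>
    by_cases h3 : k = "data science" <;> by_cases h4 : k = "machine learning" <;>
    simp_all [eq_comm]

lemma idx_FS : ∀ k, (((skillIndex.getD k []).count "Full-Stack Developer" : Nat) : Int)
    = if k ∈ ["python", "django", "javascript", "html", "css"] then 1 else 0 := by
  apply idx_count
  intro k
  simp [flatPairs, careerDB, List.countP_cons]
  by_cases h1 : k = "python" <;> by_cases h2 : k = "django" <;>
    by_cases h3 : k = "javascript" <;> by_cases h4 : k = "html" <;> by_cases h5 : k = "css" <;>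
    simp_all [eq_comm]

lemma idx_CE : ∀ k, (((skillIndex.getD k []).count "Cloud Engineer" : Nat) : Int)
    = if k ∈ ["aws", "gcp", "azure", "python"] then 1 else 0 := by
  apply idx_count
  intro k
  simp [flatPairs, careerDB, List.countP_cons]
  by_cases h1 : k = "aws" <;> by_cases h2 : k = "gcp" <;>
    by_cases h3 : k = "azure" <;> by_cases h4 : k = "python" <;>
    simp_all [eq_comm]

lemma idx_UX : ∀ k, (((skillIndex.getD k []).count "UI/UX Designer" : Nat) : Int)
    = if k ∈ ["ui/ux design", "figma", "photoshop", "html", "css"] then 1 else 0 := by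
  apply idx_count
  intro k
  simp [flatPairs, careerDB, List.countP_cons]
  by_cases h1 : k = "ui/ux design" <;> by_cases h2 : k = "figma" <;>
    by_cases h3 : k = "photoshop" <;> by_cases h4 : k = "html" <;> by_cases h5 : k = "css" <;>
    simp_all [eq_comm]

lemma idx_PM : ∀ k, (((skillIndex.getD k []).count "Project Manager" : Nat) : Int)
    = if k ∈ ["project management", "agile", "scrum"] then 1 else 0 := by
  apply idx_count
  intro k
  simp [flatPairs, careerDB, List.countP_cons]
  by_cases h1 : k = "project management" <;> by_cases h2 : k = "agile" <;>
    by_cases h3 : k = "scrum" <;>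
    simp_all [eq_comm]

-- the crediting pass accumulates, per career, the count of user skills whose lower() its required list holds
lemma scores_foldl (c : String) (req : List String)
    (hc : ∀ k, (((skillIndex.getD k []).count c : Nat) : Int) = if k ∈ req then 1 else 0) :
    ∀ (skills : List String) (sc : PySem.Dict String Int),
      (skills.foldl (fun sc s =>
        (skillIndex.getD (PySem.Str.lower s) []).foldl
          (fun sc c => sc.insert c (sc.getD c 0 + 1)) sc) sc).getD c 0
      = sc.getD c 0 + ((skills.countP (fun s => decide (PySem.Str.lower s ∈ req)) : Nat) : Int) := by
  intro skills
  induction skills with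
  | nil => intro sc; simp
  | cons s rest ih =>
    intro sc
    rw [List.foldl_cons, ih, PySem.Dict.getD_foldl_insert_add_one, hc, List.countP_cons]
    by_cases h : PySem.Str.lower s ∈ req <;> simp [h] <;> push_cast <;> ring

-- A's inner scan counts the same thing
lemma scoreA_eq_countP (skills req : List String) :
    matchScoreA skills req = ((skills.countP (fun s => decide (PySem.Str.lower s ∈ req)) : Nat) : Int) := by
  unfold matchScoreA
  have h : ∀ (ms : List String) (a : Int),
      ms.foldl (fun sc x => if PySem.Str.lower x ∈ req then sc + 1 else sc) a
        = a + ((ms.countP (fun s => decide (PySem.Str.lower s ∈ req)) : Nat) : Int) := by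
    intro ms
    induction ms with
    | nil => intro a; simp
    | cons x ms ih =>
      intro a
      rw [List.foldl_cons, ih, List.countP_cons]
      by_cases hx : PySem.Str.lower x ∈ req <;> simp [hx] <;> push_cast <;> ring
  rw [h]
  simp

lemma score_eq (c : String) (req : List String)
    (hc : ∀ k, (((skillIndex.getD k []).count c : Nat) : Int) = if k ∈ req then 1 else 0)
    (skills : List String) :
    (scoresB skills).getD c 0 = matchScoreA skills req := by
  unfold scoresB
  rw [scores_foldl c req hc skills PySem.Dict.empty, scoreA_eq_countP]
  simp

-- ===== VERDICT (by name: the statement is the Claim_ definition above) =====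
theorem match_careers_spec : Claim_equal_match_careers := by
  intro skills _
  unfold Spec_match_careers match_careers match_careers_alt
  simp only [careerDB, List.foldl, List.filterMap]
  rw [score_eq _ _ idx_DS skills, score_eq _ _ idx_FS skills, score_eq _ _ idx_CE skills,
      score_eq _ _ idx_UX skills, score_eq _ _ idx_PM skills]
  split_ifs <;> simp
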